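-- pv_equiv track=rewrite | github.com/rseusebio/hackerrank | hacker_rank/test.py | isSubsetOk
-- ===== SOURCE A (Python) =====
-- def isSubsetOk( sub, k ):
--
--     size = len( sub )
--
--     for i in range( size ):
--
--         v = sub[ i ]
--
--         for j in range( size ):
--
--             if j == i:
--                 continue
--
--             s = v + sub[ j ]
--             if  s % k == 0:
--                 return False
--
--     return True
-- ===== SOURCE B (Python) =====
-- def isSubsetOk(sub, k):
--     # One pass: keep the set of residues seen so far; a bad pair exists
--     # exactly when the complementary residue of the current element was seen.
--     if len(sub) <= 1:
--         return True
--     seen = set()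
--     for x in sub:
--         r = x % k
--         if (-r) % k in seen:
--             return False
--         seen.add(r)
--     return True
-- ===== Notes on version B (the rewrite author's own statement) =====
-- stated objective: faster
-- what changed: Replaced the nested all-pairs scan with a single pass that records residues mod k in a set and fails when the complementary residue of the current element has been seen.
import Mathlib
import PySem

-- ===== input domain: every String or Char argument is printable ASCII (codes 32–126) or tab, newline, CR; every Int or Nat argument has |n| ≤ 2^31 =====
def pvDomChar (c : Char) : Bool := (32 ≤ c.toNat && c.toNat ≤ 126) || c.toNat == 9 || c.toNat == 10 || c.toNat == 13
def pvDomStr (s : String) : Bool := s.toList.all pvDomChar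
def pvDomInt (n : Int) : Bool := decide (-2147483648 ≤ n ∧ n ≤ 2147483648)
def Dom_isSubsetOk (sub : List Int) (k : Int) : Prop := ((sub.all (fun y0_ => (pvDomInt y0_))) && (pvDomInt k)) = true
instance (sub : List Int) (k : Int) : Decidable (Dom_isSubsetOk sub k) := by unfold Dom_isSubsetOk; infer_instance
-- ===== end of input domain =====

-- B replaces A's nested all-pairs scan by one pass over a set of residues mod k (objective: faster).

-- ===== PORT A =====
def isSubsetOk (sub : List Int) (k : Int) : Bool :=
  let size : Int := sub.length
  !((PySem.List.pyRange 0 size 1).any (fun i =>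
      let v := PySem.List.pyGetD sub i 0
      (PySem.List.pyRange 0 size 1).any (fun j =>
        if j == i then false
        else decide (PySem.Int.mod (v + PySem.List.pyGetD sub j 0) k = 0))))

-- ===== PORT B =====
def isSubsetOkAltLoop (k : Int) (seen : PySem.Set Int) : List Int → Bool
  | [] => true
  | x :: xs =>
      let r := PySem.Int.mod x k
      if PySem.Set.contains seen (PySem.Int.mod (-r) k) then false
      else isSubsetOkAltLoop k (PySem.Set.add seen r) xs

def isSubsetOk_alt (sub : List Int) (k : Int) : Bool :=
  if sub.length ≤ 1 then true
  else isSubsetOkAltLoop k PySem.Set.empty sub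

-- ===== PRECONDITION & SPEC =====
-- Pre_ excludes exactly k = 0 together with at least two elements, where both Pythons raise ZeroDivisionError.
def Pre_isSubsetOk (sub : List Int) (k : Int) : Prop := k ≠ 0 ∨ sub.length ≤ 1
instance (sub : List Int) (k : Int) : Decidable (Pre_isSubsetOk sub k) := by unfold Pre_isSubsetOk; infer_instance
def pvWitness_isSubsetOk : List Int × Int := ([1, 2, 4], 3)

def Spec_isSubsetOk (sub : List Int) (k : Int) (out : Bool) : Prop := out = isSubsetOk_alt sub k
instance (sub : List Int) (k : Int) (out : Bool) : Decidable (Spec_isSubsetOk sub k out) := by unfold Spec_isSubsetOk; infer_instance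

-- ===== CLAIM (what is proved, stated in full; the proofs are below) =====
def Claim_equal_isSubsetOk : Prop := ∀ (sub : List Int) (k : Int), Dom_isSubsetOk sub k → Pre_isSubsetOk sub k → Spec_isSubsetOk sub k (isSubsetOk sub k)

-- ===== LEMMAS AND PROOFS =====

-- mod a k = mod b k ↔ k ∣ a - b  (k ≠ 0)
theorem pvModEqIff (a b k : Int) (hk : k ≠ 0) :
    PySem.Int.mod a k = PySem.Int.mod b k ↔ k ∣ a - b := by
  have ha := PySem.Int.floordiv_mul_add_mod a k
  have hb := PySem.Int.floordiv_mul_add_mod b k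
  constructor
  · intro h
    refine ⟨PySem.Int.floordiv a k - PySem.Int.floordiv b k, ?_⟩
    have := mul_sub k (PySem.Int.floordiv a k) (PySem.Int.floordiv b k)
    have := mul_comm k (PySem.Int.floordiv a k)
    have := mul_comm k (PySem.Int.floordiv b k)
    linarith
  · rintro ⟨c, hc⟩
    have hdvd : PySem.Int.mod a k - PySem.Int.mod b k
        = (a - b) - (PySem.Int.floordiv a k - PySem.Int.floordiv b k) * k := by
      have := sub_mul (PySem.Int.floordiv a k) (PySem.Int.floordiv b k) k
      linarith
    have hdvd2 : k ∣ PySem.Int.mod a k - PySem.Int.mod b k := by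
      rw [hdvd]; exact dvd_sub ⟨c, hc⟩ (dvd_mul_left k _)
    rcases hdvd2 with ⟨e, he⟩
    rcases lt_or_gt_of_ne hk with hneg | hpos
    · have h1 := PySem.Int.mod_neg_bounds a hneg
      have h2 := PySem.Int.mod_neg_bounds b hneg
      have he0 : e = 0 := by nlinarith [h1.1, h1.2, h2.1, h2.2]
      rw [he0, mul_zero] at he
      omega
    · have h1n := PySem.Int.mod_nonneg a hpos
      have h1l := PySem.Int.mod_lt a hpos
      have h2n := PySem.Int.mod_nonneg b hpos
      have h2l := PySem.Int.mod_lt b hpos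
      have he0 : e = 0 := by nlinarith
      rw [he0, mul_zero] at he
      omega

-- the residue B compares against: mod (-(mod x k)) k = mod (-x) k
theorem pvNegModMod (x k : Int) (hk : k ≠ 0) :
    PySem.Int.mod (-(PySem.Int.mod x k)) k = PySem.Int.mod (-x) k := by
  rw [pvModEqIff _ _ _ hk]
  have h := PySem.Int.floordiv_mul_add_mod x k
  refine ⟨PySem.Int.floordiv x k, ?_⟩
  have := mul_comm k (PySem.Int.floordiv x k)
  linarith

-- mod x k = mod (-y) k ↔ k ∣ x + y
theorem pvPairIff (x y k : Int) (hk : k ≠ 0) :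
    PySem.Int.mod x k = PySem.Int.mod (-y) k ↔ k ∣ x + y := by
  rw [pvModEqIff _ _ _ hk]
  constructor <;> rintro ⟨c, hc⟩ <;> exact ⟨c, by linarith⟩


-- invariant of B's loop
theorem pvAltLoopIff (k : Int) (hk : k ≠ 0) (xs : List Int) (seen : PySem.Set Int) :
    isSubsetOkAltLoop k seen xs = true ↔
      (∀ y ∈ xs, PySem.Int.mod (-y) k ∉ seen) ∧ xs.Pairwise (fun a b => ¬ k ∣ a + b) := by
  induction xs generalizing seen with
  | nil => simp [isSubsetOkAltLoop]
  | cons x xs ih =>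
    simp only [isSubsetOkAltLoop, pvNegModMod x k hk]
    by_cases hc : PySem.Int.mod (-x) k ∈ seen
    · rw [if_pos ((PySem.Set.contains_iff seen _).mpr hc)]
      constructor
      · intro h; cases h
      · rintro ⟨h, -⟩; exact absurd hc (h x List.mem_cons_self)
    · have hcf : PySem.Set.contains seen (PySem.Int.mod (-x) k) = false := by
        cases hcc : PySem.Set.contains seen (PySem.Int.mod (-x) k)
        · rfl
        · exact absurd ((PySem.Set.contains_iff seen _).mp hcc) hc
      rw [hcf, if_neg (by simp), ih, List.pairwise_cons]
      constructor
      · rintro ⟨h1, h3⟩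
        refine ⟨?_, ?_, h3⟩
        · intro y hy
          rcases List.mem_cons.mp hy with rfl | hy
          · exact hc
          · exact fun hm => h1 y hy ((PySem.Set.mem_add _ _ _).mpr (Or.inl hm))
        · intro y hy hdvd
          exact h1 y hy ((PySem.Set.mem_add _ _ _).mpr (Or.inr ((pvPairIff x y k hk).mpr hdvd).symm))
      · rintro ⟨h1, h2, h3⟩
        refine ⟨?_, h3⟩
        intro y hy hm
        rcases (PySem.Set.mem_add _ _ _).mp hm with hm | heq
        · exact h1 y (List.mem_cons_of_mem _ hy) hm
        · exact h2 y hy ((pvPairIff x y k hk).mp heq.symm)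

-- A's nested scan decides pairwise non-divisibility of the sums
theorem pvAIff (sub : List Int) (k : Int) :
    isSubsetOk sub k = true ↔ sub.Pairwise (fun a b => ¬ k ∣ a + b) := by
  unfold isSubsetOk
  rw [Bool.not_eq_eq_eq_not, Bool.not_true, List.any_eq_false]
  simp only [List.any_eq_true, PySem.List.mem_pyRange_one, beq_iff_eq, not_exists, not_and,
    PySem.Int.mod_eq_zero_iff_dvd]
  rw [List.pairwise_iff_getElem]
  constructor
  · intro h i j hi hj hij hdvd
    have h1 := h (i : Int) ⟨by omega, by omega⟩
    have h2 := h1 (j : Int) ⟨by omega, by omega⟩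
    rw [if_neg (by omega)] at h2
    rw [PySem.List.pyGetD_eq_getElem sub 0 (by omega) (by omega),
        PySem.List.pyGetD_eq_getElem sub 0 (by omega) (by omega)] at h2
    simp only [Int.toNat_natCast] at h2
    exact h2 (by simpa [PySem.Int.mod_eq_zero_iff_dvd] using hdvd)
  · intro h i hi j hj
    by_cases hij : j = i
    · rw [if_pos hij]; simp
    · rw [if_neg hij]
      rw [PySem.List.pyGetD_eq_getElem sub 0 (by omega) (by omega),
          PySem.List.pyGetD_eq_getElem sub 0 (by omega) (by omega)]
      simp only [decide_eq_true_eq]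
      rcases lt_or_gt_of_ne hij with hlt | hlt
      · intro hdvd
        exact h j.toNat i.toNat (by omega) (by omega) (by omega)
          (by rwa [Int.add_comm] at hdvd)
      · intro hdvd
        exact h i.toNat j.toNat (by omega) (by omega) (by omega) hdvd

-- ===== VERDICT (by name: the statement is the Claim_ definition above) =====
theorem isSubsetOk_spec : Claim_equal_isSubsetOk := by
  intro sub k _ hpre
  unfold Spec_isSubsetOk isSubsetOk_alt
  by_cases hlen : sub.length ≤ 1
  · rw [if_pos hlen]
    rw [Bool.eq_iff_iff, pvAIff]
    simp only [iff_true]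
    rcases sub with _ | ⟨x, _ | ⟨y, t⟩⟩
    · exact List.Pairwise.nil
    · exact List.pairwise_singleton _ _
    · simp only [List.length_cons] at hlen
      omega
  · rw [if_neg hlen]
    have hk : k ≠ 0 := by
      rcases hpre with h | h
      · exact h
      · exact absurd h hlen
    have hB : isSubsetOkAltLoop k PySem.Set.empty sub = true ↔
        sub.Pairwise (fun a b => ¬ k ∣ a + b) := by
      rw [pvAltLoopIff k hk]
      constructor
      · exact And.right
      · intro hp
        exact ⟨fun y _ h => by simp [PySem.Set.empty] at h, hp⟩
    rw [Bool.eq_iff_iff, pvAIff, hB]
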